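-- pv_equiv track=rewrite | github.com/Bitwise-01/BadCrypto | lib/badcrypto.py | _shift_bottom
-- ===== SOURCE A (Python) =====
-- import copy
--
-- def xor(a, b):
--     return chr(ord(a) ^ ord(b))
--
-- def _shift_bottom(block):
--     nlen = len(block)
--     block = copy.deepcopy(block)
--
--     for i in range(nlen-1, -1, -1):
--         r = i + 1 if i + 1 < nlen else ((i + 1) - nlen)
--
--         a = block[i]
--         b = block[r]
--
--         block[i] = xor(a, b)
--
--     return block
-- ===== SOURCE B (Python) =====
-- def _shift_bottom(block):
--     # Closed form instead of A's backward cascade: result[i] is the xor of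
--     # ord(block[i])..ord(block[n-1]) and ord(block[0]); compute running prefix
--     # xors forward once, then result[i] = chr(total ^ pref[i] ^ first).
--     if not block:
--         return list(block)
--     n = len(block)
--     pref = [0] * (n + 1)
--     for i, s in enumerate(block):
--         pref[i + 1] = pref[i] ^ ord(s)
--     total = pref[n]
--     f = ord(block[0])
--     return [chr((total ^ pref[i]) ^ f) for i in range(n)]
-- ===== Notes on version B (the rewrite author's own statement) =====
-- stated objective: alternative
-- what changed: Replaces A's backward in-place cascade loop (each cell xored into its cyclic successor's already-updated value) by a closed form: one forward prefix-xor pass, then result[i] = chr(total ^ pref[i] ^ ord(block[0])).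
import Mathlib
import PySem

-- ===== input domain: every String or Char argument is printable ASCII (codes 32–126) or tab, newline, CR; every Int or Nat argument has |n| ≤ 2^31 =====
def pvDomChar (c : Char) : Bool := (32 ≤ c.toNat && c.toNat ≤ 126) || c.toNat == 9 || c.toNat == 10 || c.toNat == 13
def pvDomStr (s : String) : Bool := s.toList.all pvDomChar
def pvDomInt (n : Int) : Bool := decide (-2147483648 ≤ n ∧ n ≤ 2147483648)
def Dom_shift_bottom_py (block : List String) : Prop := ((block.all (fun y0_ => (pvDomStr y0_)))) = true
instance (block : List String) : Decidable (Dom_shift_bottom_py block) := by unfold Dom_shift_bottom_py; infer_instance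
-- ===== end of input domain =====

-- B replaces A's backward cascade loop by a closed form: one forward prefix-xor pass,
-- then result[i] = chr(total ^ pref[i] ^ ord(block[0])) (alternative decomposition, same cost).

-- ===== PORT A =====
-- helper xor(a, b) = chr(ord(a) ^ ord(b)); exact when a and b are single characters
-- (guaranteed by Pre_); Python's ord raises TypeError on other strings, which Pre_ excludes.
def pyXor (a b : String) : String :=
  match a.toList, b.toList with
  | [x], [y] => String.ofList [Char.ofNat (x.toNat ^^^ y.toNat)]
  | _, _ => ""

-- the body of A's for-loop, with nlen the (fixed) original length
def shiftStepA (nlen : Int) (blk : List String) (i : Int) : List String :=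
  let r : Int := if i + 1 < nlen then i + 1 else (i + 1) - nlen
  let a := PySem.List.pyGetD blk i ""
  let b := PySem.List.pyGetD blk r ""
  PySem.List.pySetD blk i (pyXor a b)

def shift_bottom_py (block : List String) : List String :=
  let nlen : Int := block.length
  (PySem.List.pyRange (nlen - 1) (-1) (-1)).foldl (shiftStepA nlen) block

-- ===== PORT B =====
-- ord(s) for a single-character string (Pre_ excludes others, where Python raises)
def pyOrd (s : String) : Nat :=
  match s.toList with
  | [x] => x.toNat
  | _ => 0

def pyChr (n : Nat) : String := String.ofList [Char.ofNat n]

def shift_bottom_py_alt (block : List String) : List String :=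
  match block with
  | [] => []
  | first :: _ =>
    -- pref[i] = xor of the ords of block[0..i-1]; built by one forward pass
    let pref : List Nat := block.foldl (fun p s => p ++ [p.getLastD 0 ^^^ pyOrd s]) [0]
    let total := pref.getLastD 0
    let f := pyOrd first
    (List.range block.length).map (fun i => pyChr ((total ^^^ pref.getD i 0) ^^^ f))

-- ===== PRECONDITION & SPEC =====
-- Pre_ excludes blocks containing a string that is not a single character: there
-- Python's ord (inside xor) raises TypeError, so A returns no value.
def Pre_shift_bottom_py (block : List String) : Prop :=
  ∀ s ∈ block, s.toList.length = 1
instance (block : List String) : Decidable (Pre_shift_bottom_py block) := by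
  unfold Pre_shift_bottom_py; infer_instance

def pvWitness_shift_bottom_py : List String := ["a", "b", "c"]

def Spec_shift_bottom_py (block : List String) (out : List String) : Prop := out = shift_bottom_py_alt block
instance (block : List String) (out : List String) : Decidable (Spec_shift_bottom_py block out) := by unfold Spec_shift_bottom_py; infer_instance

-- ===== CLAIM (what is proved, stated in full; the proofs are below) =====
def Claim_equal_shift_bottom_py : Prop := ∀ (block : List String), Dom_shift_bottom_py block → Pre_shift_bottom_py block → Spec_shift_bottom_py block (shift_bottom_py block)

-- ===== LEMMAS AND PROOFS =====

-- the common characterisation: result[i] = xor(block[i], result[i+1]) with result[n-1] = xor(block[n-1], first)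
def cascade (first : String) : List String → List String
  | [] => []
  | x :: rest =>
    let c := cascade first rest
    pyXor x (c.headD first) :: c

theorem cascade_ne_nil (first : String) (x : String) (l : List String) :
    cascade first (x :: l) ≠ [] := by
  simp [cascade]

-- ===== A side: A computes the cascade =====
theorem getD_append_left {l1 l2 : List String} {k : ℕ} (h : k < l1.length) (d : String) :
    (l1 ++ l2).getD k d = l1.getD k d := by
  simp [List.getD, List.getElem?_append_left h]

theorem getD_append_length {l1 l2 : List String} {n : ℕ} (h : n = l1.length) (d : String) :
    (l1 ++ l2).getD n d = l2.getD 0 d := by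
  subst h; simp [List.getD, List.getElem?_append_right (Nat.le_refl _)]

theorem headD_eq_getD (l : List String) (d : String) : l.headD d = l.getD 0 d := by
  cases l <;> rfl

-- the step lemma: one iteration of A's loop at index k extends the computed suffix by one
theorem stepA_inv (block : List String) (k : ℕ) (hk : k < block.length) :
    shiftStepA (block.length)
      (block.take (k+1) ++ cascade (block.headD "") (block.drop (k+1))) (k : Int)
    = block.take k ++ cascade (block.headD "") (block.drop k) := by
  set first := block.headD "" with hfirst
  have hlen_take : (block.take (k+1)).length = k + 1 := by
    simp [List.length_take]; omega
  have hgetk : PySem.List.pyGetD (block.take (k+1) ++ cascade first (block.drop (k+1))) (k : Int) ""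
      = block[k] := by
    rw [PySem.List.pyGetD_natCast, getD_append_left (by omega), List.getD,
        List.getElem?_take_of_lt (by omega), List.getElem?_eq_getElem hk]
    rfl
  have hdropk : block.drop k = block[k] :: block.drop (k+1) :=
    List.drop_eq_getElem_cons hk
  by_cases hcase : k + 1 < block.length
  · -- r = k+1, reads the head of the already-computed suffix
    have hdrop_ne : block.drop (k+1) ≠ [] := by
      simp [List.drop_eq_nil_iff]; omega
    have hcas_ne : cascade first (block.drop (k+1)) ≠ [] := by
      obtain ⟨y, ys, hy⟩ := List.exists_cons_of_ne_nil hdrop_ne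
      rw [hy]; exact cascade_ne_nil _ _ _
    have hgetr : PySem.List.pyGetD (block.take (k+1) ++ cascade first (block.drop (k+1))) ((k : Int) + 1) ""
        = (cascade first (block.drop (k+1))).headD first := by
      have : ((k : Int) + 1) = ((k + 1 : ℕ) : Int) := by push_cast; ring
      rw [this, PySem.List.pyGetD_natCast, getD_append_length hlen_take.symm, ← headD_eq_getD]
      obtain ⟨y, ys, hy⟩ := List.exists_cons_of_ne_nil hcas_ne
      rw [hy]; rfl
    simp only [shiftStepA]
    rw [if_pos (by omega)]
    rw [hgetk, hgetr, PySem.List.pySetD_natCast]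
    rw [List.set_append_left _ _ (by omega)]
    have htake : ∀ v : String, (block.take (k+1)).set k v = block.take k ++ [v] := by
      intro v
      rw [List.set_eq_take_append_cons_drop, if_pos (by omega), List.take_take,
          Nat.min_eq_left (by omega), List.drop_eq_nil_iff.2 (by simp)]
    rw [htake, List.append_assoc]
    congr 1
    rw [hdropk]
    simp [cascade]
  · -- k = block.length - 1 : r wraps to 0 and reads the original first element
    have hkeq : k + 1 = block.length := by omega
    have htake_all : block.take (k+1) = block := by rw [hkeq, List.take_length]
    have hdrop_all : block.drop (k+1) = [] := by rw [hkeq, List.drop_length]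
    have hgetr : PySem.List.pyGetD (block.take (k+1) ++ cascade first (block.drop (k+1))) (0 : Int) ""
        = first := by
      rw [htake_all, hdrop_all]
      show PySem.List.pyGetD (block ++ cascade first []) ((0:ℕ) : Int) "" = first
      rw [PySem.List.pyGetD_natCast]
      simp only [cascade, List.append_nil]
      rw [← headD_eq_getD, hfirst]
    simp only [shiftStepA]
    rw [if_neg (by omega)]
    have hr0 : (k : Int) + 1 - (block.length : Int) = 0 := by omega
    rw [hr0, hgetk, hgetr, PySem.List.pySetD_natCast]
    rw [htake_all, hdrop_all]
    simp only [cascade, List.append_nil]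
    have hset : block.set k (pyXor block[k] first) = block.take k ++ [pyXor block[k] first] := by
      rw [List.set_eq_take_append_cons_drop, if_pos hk, hkeq, List.drop_length]
    rw [hset]
    congr 1
    rw [hdropk, hdrop_all]
    simp [cascade]

-- running A's loop from index j down to 0 on a state where indices > j are done yields the full cascade
theorem loopA_inv (block : List String) :
    ∀ j : ℕ, j < block.length →
    (PySem.List.pyRange (j : Int) (-1) (-1)).foldl (shiftStepA (block.length))
      (block.take (j+1) ++ cascade (block.headD "") (block.drop (j+1)))
    = cascade (block.headD "") block := by
  intro j
  induction j with
  | zero =>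
    intro h0
    rw [PySem.List.pyRange_neg_one_cons (by omega)]
    rw [PySem.List.pyRange_neg_one_eq_nil (by omega)]
    simp only [List.foldl_cons, List.foldl_nil]
    have := stepA_inv block 0 h0
    simp only [Nat.cast_zero] at this ⊢
    rw [this]; simp
  | succ j ih =>
    intro hj
    rw [PySem.List.pyRange_neg_one_cons (by omega)]
    simp only [List.foldl_cons]
    have hstep := stepA_inv block (j+1) hj
    rw [hstep]
    have : ((j : Int) + 1) - 1 = (j : Int) := by ring
    push_cast
    push_cast at this
    rw [this]
    exact ih (by omega)

theorem A_eq_cascade (first : String) (rest : List String) :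
    shift_bottom_py (first :: rest) = cascade first (first :: rest) := by
  have hlen : 0 < (first :: rest).length := by simp
  have hcast : ((first :: rest).length : Int) - 1 = (((first :: rest).length - 1 : ℕ) : Int) := by
    push_cast [Nat.cast_sub (by omega : 1 ≤ (first :: rest).length)]; ring
  have hstart : (first :: rest).take (((first :: rest).length - 1) + 1) ++
      cascade ((first :: rest).headD "") ((first :: rest).drop (((first :: rest).length - 1) + 1))
      = (first :: rest) := by
    have : (first :: rest).length - 1 + 1 = (first :: rest).length := by omega
    rw [this, List.take_length, List.drop_length]
    simp [cascade]
  have := loopA_inv (first :: rest) ((first :: rest).length - 1) (by omega)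
  rw [hstart] at this
  simp only [shift_bottom_py]
  rw [hcast, this]
  rfl

-- ===== B side: the prefix-xor closed form computes the cascade too =====

-- a block element admitted by Dom ∧ Pre_: a single character of code < 128
def okS (s : String) : Prop := ∃ c : Char, s.toList = [c] ∧ c.toNat < 128

-- xor of the ords of all elements
def xorAll : List String → Nat
  | [] => 0
  | x :: r => pyOrd x ^^^ xorAll r

theorem xorAll_append (l1 l2 : List String) : xorAll (l1 ++ l2) = xorAll l1 ^^^ xorAll l2 := by
  induction l1 with
  | nil => simp [xorAll]
  | cons x r ih => simp [xorAll, ih, Nat.xor_assoc]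

theorem xorAll_lt (l : List String) (h : ∀ s ∈ l, okS s) : xorAll l < 128 := by
  induction l with
  | nil => simp [xorAll]
  | cons x r ih =>
    obtain ⟨c, hc, hlt⟩ := h x (by simp)
    have h1 : pyOrd x < 128 := by simp [pyOrd, hc, hlt]
    have h2 : xorAll r < 128 := ih (fun s hs => h s (by simp [hs]))
    exact Nat.xor_lt_two_pow (n := 7) h1 h2

theorem xorAll_drop (l : List String) (i : ℕ) :
    xorAll l ^^^ xorAll (l.take i) = xorAll (l.drop i) := by
  have h := xorAll_append (l.take i) (l.drop i)
  rw [List.take_append_drop] at h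
  rw [h, Nat.xor_comm (xorAll (l.take i)), Nat.xor_assoc, Nat.xor_self, Nat.xor_zero]

theorem okS_chr (s : String) (h : okS s) : pyChr (pyOrd s) = s := by
  obtain ⟨c, hc, _⟩ := h
  simp only [pyChr, pyOrd, hc, Char.ofNat_toNat]
  rw [← hc, String.ofList_toList]

theorem toNat_ofNat_lt (n : Nat) (h : n < 128) : (Char.ofNat n).toNat = n := by
  rw [Char.toNat_ofNat, if_pos (Or.inl (by omega : n < 0xd800))]

theorem pyXor_chr (x : String) (m : Nat) (hx : okS x) (hm : m < 128) :
    pyXor x (pyChr m) = pyChr (pyOrd x ^^^ m) := by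
  obtain ⟨c, hc, _⟩ := hx
  simp only [pyXor, hc, pyChr, pyOrd, String.toList_ofList, toNat_ofNat_lt m hm]

-- the cascade, written as the closed form B computes
theorem cascade_closed (f : Nat) (hf : f < 128) (l : List String) (hl : ∀ s ∈ l, okS s) :
    cascade (pyChr f) l = (List.range l.length).map (fun i => pyChr (xorAll (l.drop i) ^^^ f))
    ∧ (cascade (pyChr f) l).headD (pyChr f) = pyChr (xorAll l ^^^ f) := by
  induction l with
  | nil => simp [cascade, xorAll]
  | cons x r ih =>
    obtain ⟨ih1, ih2⟩ := ih (fun s hs => hl s (by simp [hs]))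
    have hxr : xorAll r ^^^ f < 128 :=
      Nat.xor_lt_two_pow (n := 7) (xorAll_lt r (fun s hs => hl s (by simp [hs]))) hf
    have hhead : pyXor x ((cascade (pyChr f) r).headD (pyChr f)) = pyChr (xorAll (x :: r) ^^^ f) := by
      rw [ih2, pyXor_chr x _ (hl x (by simp)) hxr]
      simp [xorAll, Nat.xor_assoc]
    constructor
    · show pyXor x ((cascade (pyChr f) r).headD (pyChr f)) :: cascade (pyChr f) r = _
      rw [hhead, ih1]
      simp only [List.length_cons, List.range_succ_eq_map, List.map_cons, List.map_map]
      rfl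
    · show (pyXor x ((cascade (pyChr f) r).headD (pyChr f)) :: cascade (pyChr f) r).headD _ = _
      simp only [List.headD_cons]
      exact hhead

-- the forward fold builds the list of running prefix xors
def prefList : Nat → List String → List Nat
  | _, [] => []
  | a, x :: r => (a ^^^ pyOrd x) :: prefList (a ^^^ pyOrd x) r

theorem fold_prefList (l : List String) :
    ∀ p : List Nat, l.foldl (fun p s => p ++ [p.getLastD 0 ^^^ pyOrd s]) p
      = p ++ prefList (p.getLastD 0) l := by
  induction l with
  | nil => intro p; simp [prefList]
  | cons x r ih =>
    intro p
    simp only [List.foldl_cons]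
    rw [ih (p ++ [p.getLastD 0 ^^^ pyOrd x])]
    rw [List.getLastD_concat]
    simp [prefList]

theorem prefList_getD (l : List String) :
    ∀ (a : Nat) (i : ℕ), i < l.length →
      (prefList a l).getD i 0 = a ^^^ xorAll (l.take (i+1)) := by
  induction l with
  | nil => intro a i h; simp at h
  | cons x r ih =>
    intro a i h
    cases i with
    | zero => simp [prefList, xorAll, List.getD]
    | succ i =>
      simp only [prefList, List.getD_cons_succ]
      rw [ih (a ^^^ pyOrd x) i (by simpa using h)]
      simp [xorAll, Nat.xor_assoc]

theorem prefList_getLastD (l : List String) :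
    ∀ (a d : Nat), l ≠ [] → (prefList a l).getLastD d = a ^^^ xorAll l := by
  induction l with
  | nil => intro a d h; exact absurd rfl h
  | cons x r ih =>
    intro a d _
    cases hr : r with
    | nil => subst hr; simp [prefList, xorAll]
    | cons y t =>
      subst hr
      rw [show prefList a (x :: y :: t) = (a ^^^ pyOrd x) :: prefList (a ^^^ pyOrd x) (y :: t) from rfl,
          List.getLastD_cons, ih (a ^^^ pyOrd x) (a ^^^ pyOrd x) (by simp)]
      simp [xorAll, Nat.xor_assoc]

theorem B_eq_cascade (first : String) (rest : List String)
    (h : ∀ s ∈ (first :: rest), okS s) :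
    shift_bottom_py_alt (first :: rest) = cascade first (first :: rest) := by
  set l := first :: rest with hl
  have hf : okS first := h first (by simp [hl])
  have hflt : pyOrd first < 128 := by
    obtain ⟨c, hc, hlt⟩ := hf; simp [pyOrd, hc, hlt]
  have hpref : l.foldl (fun p s => p ++ [p.getLastD 0 ^^^ pyOrd s]) [0]
      = 0 :: prefList 0 l := by
    rw [fold_prefList]; rfl
  have hlne : l ≠ [] := by simp [hl]
  have htot : (0 :: prefList 0 l).getLastD 0 = xorAll l := by
    rw [List.getLastD_cons, prefList_getLastD l 0 0 hlne, Nat.zero_xor]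
  have hgetD : ∀ i : ℕ, i < l.length → (0 :: prefList 0 l).getD i 0 = xorAll (l.take i) := by
    intro i hi
    cases i with
    | zero => simp [List.getD, xorAll]
    | succ i =>
      rw [List.getD_cons_succ, prefList_getD l 0 i (by omega), Nat.zero_xor]
  have hclosed := cascade_closed (pyOrd first) hflt l h
  conv_rhs => rw [← okS_chr first hf]
  rw [hclosed.1]
  show (List.range l.length).map _ = _
  rw [hpref]
  apply List.map_congr_left
  intro i hi
  have hi' : i < l.length := List.mem_range.mp hi
  rw [htot, hgetD i hi', xorAll_drop]

-- ===== VERDICT (by name: the statement is the Claim_ definition above) =====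
theorem shift_bottom_py_spec : Claim_equal_shift_bottom_py := by
  intro block hdom hpre
  unfold Spec_shift_bottom_py
  cases block with
  | nil => rfl
  | cons first rest =>
    have hok : ∀ s ∈ (first :: rest), okS s := by
      intro s hs
      have h1 := hpre s hs
      have h2 : pvDomStr s = true := by
        have := (List.all_eq_true.mp hdom) s hs
        simpa using this
      obtain ⟨c, hc⟩ : ∃ c, s.toList = [c] := by
        cases hsl : s.toList with
        | nil => simp [hsl] at h1
        | cons a t =>
          cases t with
          | nil => exact ⟨a, rfl⟩
          | cons b u => simp [hsl] at h1
      refine ⟨c, hc, ?_⟩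
      have := (List.all_eq_true.mp (by simpa [pvDomStr] using h2)) c (by simp [hc])
      simp [pvDomChar] at this
      omega
    rw [A_eq_cascade, B_eq_cascade first rest hok]
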